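-- pv_equiv track=rewrite | github.com/Shreyaar12/python-litcoder | Modules/Module 4/Lab1/arrayMani.py | mix_the_array
-- ===== SOURCE A (Python) =====
-- def mix_the_array(n, queries):
--     arr = [0] * (n + 1)
--
--     for start, end, value in queries:
--         arr[start - 1] += value
--         if end < n:
--             arr[end] -= value
--
--     max_value, current = 0, 0
--     for val in arr:
--         current += val
--         max_value = max(max_value, current)
--
--     return max_value
-- ===== SOURCE B (Python) =====
-- def mix_the_array(n, queries):
--     # Keep the array of running totals itself up to date: each query adds its
--     # value to the suffix of totals starting at position start-1, and (when the
--     # query's end lies inside the array) takes it back off the suffix starting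
--     # at end.  The answer is the largest total seen, floored at zero.
--     totals = [0] * (n + 1)
--     for start, end, value in queries:
--         totals[start - 1:] = [t + value for t in totals[start - 1:]]
--         if end < n:
--             totals[end:] = [t - value for t in totals[end:]]
--     return max(0, max(totals, default=0))
-- ===== Notes on version B (the rewrite author's own statement) =====
-- stated objective: alternative
-- what changed: B drops A's difference array and final prefix-sum accumulator scan: it keeps the running-total array itself up to date, rewriting the suffix of the array with a slice assignment per query, and returns max(0, max(totals)); Pre_ excludes only the inputs where A raises IndexError (a query index outside the length-(n+1) array, including any query when n < 0).
import Mathlib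
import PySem

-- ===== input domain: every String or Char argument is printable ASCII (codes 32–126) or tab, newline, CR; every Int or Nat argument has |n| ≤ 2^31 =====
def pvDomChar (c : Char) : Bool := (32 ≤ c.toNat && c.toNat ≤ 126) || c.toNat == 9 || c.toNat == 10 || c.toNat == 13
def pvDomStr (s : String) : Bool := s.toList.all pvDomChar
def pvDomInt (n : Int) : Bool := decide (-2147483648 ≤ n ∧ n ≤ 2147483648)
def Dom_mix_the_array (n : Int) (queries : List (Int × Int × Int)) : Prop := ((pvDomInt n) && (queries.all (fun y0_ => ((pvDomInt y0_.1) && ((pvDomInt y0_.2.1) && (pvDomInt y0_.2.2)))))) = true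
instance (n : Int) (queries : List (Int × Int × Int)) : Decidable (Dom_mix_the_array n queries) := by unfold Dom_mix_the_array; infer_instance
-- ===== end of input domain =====

-- B keeps the running-total array itself up to date with two suffix-slice updates
-- per query (no difference array, no final accumulator scan); same return value.

-- ===== PORT A =====
-- "arr[i] += v" / "arr[i] -= v" with Python indexing (no-op branch is unreachable under Pre_)
def pyIAdd (arr : List Int) (i v : Int) : List Int :=
  match PySem.List.pyGet? arr i with
  | some x => PySem.List.pySetD arr i (x + v)
  | none => arr

def pyISub (arr : List Int) (i v : Int) : List Int :=
  match PySem.List.pyGet? arr i with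
  | some x => PySem.List.pySetD arr i (x - v)
  | none => arr

-- one iteration of A's query loop: arr[start-1] += value; if end < n: arr[end] -= value
def aStep (n : Int) (arr : List Int) (q : Int × Int × Int) : List Int :=
  let arr1 := pyIAdd arr (q.1 - 1) q.2.2
  if q.2.1 < n then pyISub arr1 q.2.1 q.2.2 else arr1

def mix_the_array (n : Int) (queries : List (Int × Int × Int)) : Int :=
  let arr0 := PySem.List.pyRepeat [(0 : Int)] (n + 1)
  let arr := queries.foldl (aStep n) arr0
  (arr.foldl (fun p val => (max p.1 (p.2 + val), p.2 + val)) ((0 : Int), (0 : Int))).1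

-- ===== PORT B =====
-- one iteration of B's query loop: Python's "totals[a:] = [t ± value for t in totals[a:]]"
-- (slice assignment: the part before the slice, totals[:a], then the rewritten suffix)
def altStep (n : Int) (totals : List Int) (q : Int × Int × Int) : List Int :=
  let t1 := PySem.List.slice totals none (some (q.1 - 1))
              ++ (PySem.List.slice totals (some (q.1 - 1)) none).map (fun t => t + q.2.2)
  if q.2.1 < n then
    PySem.List.slice t1 none (some q.2.1)
      ++ (PySem.List.slice t1 (some q.2.1) none).map (fun t => t - q.2.2)
  else t1

def mix_the_array_alt (n : Int) (queries : List (Int × Int × Int)) : Int :=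
  let totals0 := PySem.List.pyRepeat [(0 : Int)] (n + 1)
  let totals := queries.foldl (altStep n) totals0
  max 0 (PySem.List.maxD totals (fun y => y) 0)

-- ===== PRECONDITION & SPEC =====
-- Pre_ excludes exactly the inputs on which A raises (IndexError: a query index outside
-- the list of length n+1, including every query when n < 0).
def Pre_mix_the_array (n : Int) (queries : List (Int × Int × Int)) : Prop :=
  ∀ q ∈ queries, 0 ≤ n ∧ -(n + 1) ≤ q.1 - 1 ∧ q.1 - 1 < n + 1 ∧ (q.2.1 < n → -(n + 1) ≤ q.2.1)
instance (n : Int) (queries : List (Int × Int × Int)) : Decidable (Pre_mix_the_array n queries) := by unfold Pre_mix_the_array; infer_instance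

def pvWitness_mix_the_array : Int × (List (Int × Int × Int)) := (3, [(1, 2, 5), (0, 4, -2)])

def Spec_mix_the_array (n : Int) (queries : List (Int × Int × Int)) (out : Int) : Prop := out = mix_the_array_alt n queries
instance (n : Int) (queries : List (Int × Int × Int)) (out : Int) : Decidable (Spec_mix_the_array n queries out) := by unfold Spec_mix_the_array; infer_instance

-- ===== CLAIM (what is proved, stated in full; the proofs are below) =====
def Claim_equal_mix_the_array : Prop := ∀ (n : Int) (queries : List (Int × Int × Int)), Dom_mix_the_array n queries → Pre_mix_the_array n queries → Spec_mix_the_array n queries (mix_the_array n queries)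

-- ===== LEMMAS AND PROOFS =====

-- running prefix sums of a list, starting from accumulator c
def psum (c : Int) : List Int → List Int
  | [] => []
  | x :: xs => (c + x) :: psum (c + x) xs

-- add v to every element from position a on
def sufAdd (v : Int) : Nat → List Int → List Int
  | _, [] => []
  | 0, x :: xs => (x + v) :: sufAdd v 0 xs
  | a + 1, x :: xs => x :: sufAdd v a xs

theorem psum_length (c : Int) (l : List Int) : (psum c l).length = l.length := by
  induction l generalizing c with
  | nil => rfl
  | cons x xs ih => simp [psum, ih]

theorem psum_shift (v : Int) (l : List Int) (c : Int) :
    psum (c + v) l = (psum c l).map (· + v) := by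
  induction l generalizing c with
  | nil => rfl
  | cons x xs ih =>
    simp only [psum, List.map]
    congr 1
    · ring
    · rw [show c + v + x = c + x + v by ring, ih (c + x)]

theorem sufAdd_zero (v : Int) (l : List Int) : sufAdd v 0 l = l.map (· + v) := by
  induction l with
  | nil => rfl
  | cons x xs ih => simp [sufAdd, ih]

theorem psum_set (v : Int) (l : List Int) (c : Int) (j : Nat) (h : j < l.length) :
    psum c (l.set j (l.getD j 0 + v)) = sufAdd v j (psum c l) := by
  induction l generalizing c j with
  | nil => simp at h
  | cons x xs ih =>
    cases j with
    | zero =>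
      simp only [List.set, List.getD, psum, sufAdd, List.getElem?_cons_zero, Option.getD_some]
      congr 1
      · ring
      · rw [show c + (x + v) = (c + x) + v by ring, psum_shift, sufAdd_zero]
    | succ j =>
      simp only [List.set, psum, sufAdd, List.getD_cons_succ]
      congr 1
      exact ih (c + x) j (by simpa using h)

-- xs[:b] is take (clampIdx len b) (general b; the listed slice_to needs 0 ≤ b)
theorem slice_none_some (l : List Int) (b : Int) :
    PySem.List.slice l none (some b) = l.take (PySem.List.clampIdx l.length b) := by
  simp [PySem.List.slice]

-- sufAdd is exactly "prefix unchanged, suffix shifted"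
theorem sufAdd_take_drop (v : Int) (k : Nat) (l : List Int) :
    l.take k ++ (l.drop k).map (fun t => t + v) = sufAdd v k l := by
  induction l generalizing k with
  | nil => simp [sufAdd]
  | cons x xs ih =>
    cases k with
    | zero => simp [sufAdd_zero v (x :: xs)]
    | succ k => simpa [sufAdd] using ih k

-- B's slice-assignment step is sufAdd at the clamped index
theorem slice_sufAdd (l : List Int) (i v : Int) :
    PySem.List.slice l none (some i)
        ++ (PySem.List.slice l (some i) none).map (fun t => t + v)
      = sufAdd v (PySem.List.clampIdx l.length i) l := by
  rw [slice_none_some, PySem.List.slice_some_none, sufAdd_take_drop]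

theorem slice_sufSub (l : List Int) (i v : Int) :
    PySem.List.slice l none (some i)
        ++ (PySem.List.slice l (some i) none).map (fun t => t - v)
      = sufAdd (-v) (PySem.List.clampIdx l.length i) l := by
  have h := slice_sufAdd l i (-v)
  simpa [← sub_eq_add_neg] using h

-- the clamped slice index for an in-range (possibly negative) Python index
theorem clampIdx_in_range (len : Nat) (i : Int) (h1 : -(len : Int) ≤ i) (h2 : i < len) :
    (PySem.List.clampIdx len i : Int) = if 0 ≤ i then i else i + len := by
  unfold PySem.List.clampIdx
  split_ifs <;> omega

-- A's "arr[i] += v" (get then set, Python indexing) lands at the clamped position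
theorem pyAdd_norm (arr : List Int) (i v : Int)
    (h1 : -(arr.length : Int) ≤ i) (h2 : i < arr.length) :
    pyIAdd arr i v
      = arr.set (PySem.List.clampIdx arr.length i)
          (arr.getD (PySem.List.clampIdx arr.length i) 0 + v) := by
  have hcl := clampIdx_in_range arr.length i h1 h2
  unfold pyIAdd
  by_cases h : 0 ≤ i
  · have hj : PySem.List.clampIdx arr.length i = i.toNat := by rw [if_pos h] at hcl; omega
    have hlt : i.toNat < arr.length := by omega
    rw [hj]
    simp [PySem.List.pyGet?_of_nonneg arr h, List.getElem?_eq_getElem hlt,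
      PySem.List.pySetD_of_nonneg arr _ h, List.getD_eq_getElem?_getD]
  · rw [if_neg h] at hcl
    obtain ⟨k, hk⟩ : ∃ k : Nat, i = -(k : Int) := ⟨(-i).toNat, by omega⟩
    subst hk
    have hj : PySem.List.clampIdx arr.length (-(k : Int)) = arr.length - k := by omega
    have hlt : arr.length - k < arr.length := by omega
    rw [hj, PySem.List.pyGet?_neg_natCast arr k (by omega) (by omega),
      List.getElem?_eq_getElem hlt]
    have hcond2 : -((arr.length : Nat) : Int) ≤ -(k : Int) := by omega
    have heq : (-(k : Int) + arr.length).toNat = arr.length - k := by omega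
    have hk0 : ¬ (k = 0) := by omega
    simp [PySem.List.pySetD, PySem.List.pySet?, PySem.List.pyIdx?, hk0, hcond2,
      List.getD_eq_getElem?_getD, List.getElem?_eq_getElem hlt]

-- subtracting forms
theorem pySub_norm (arr : List Int) (i v : Int)
    (h1 : -(arr.length : Int) ≤ i) (h2 : i < arr.length) :
    pyISub arr i v
      = arr.set (PySem.List.clampIdx arr.length i)
          (arr.getD (PySem.List.clampIdx arr.length i) 0 - v) := by
  have h := pyAdd_norm arr i (-v) h1 h2
  unfold pyIAdd at h
  unfold pyISub
  simpa [← sub_eq_add_neg] using h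

theorem psum_set_sub (v : Int) (l : List Int) (c : Int) (j : Nat) (h : j < l.length) :
    psum c (l.set j (l.getD j 0 - v)) = sufAdd (-v) j (psum c l) := by
  have h2 := psum_set (-v) l c j h
  simpa [← sub_eq_add_neg] using h2

theorem length_pyIAdd (arr : List Int) (i v : Int) : (pyIAdd arr i v).length = arr.length := by
  unfold pyIAdd
  cases PySem.List.pyGet? arr i <;> simp [PySem.List.length_pySetD]

theorem length_pyISub (arr : List Int) (i v : Int) : (pyISub arr i v).length = arr.length := by
  unfold pyISub
  cases PySem.List.pyGet? arr i <;> simp [PySem.List.length_pySetD]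

-- one query: B's step on the prefix sums = prefix sums of A's step
theorem step_eq (n : Int) (arr : List Int) (q : Int × Int × Int)
    (hq : 0 ≤ n ∧ -(n + 1) ≤ q.1 - 1 ∧ q.1 - 1 < n + 1 ∧ (q.2.1 < n → -(n + 1) ≤ q.2.1))
    (hlen : arr.length = (n + 1).toNat) :
    altStep n (psum 0 arr) q = psum 0 (aStep n arr q) := by
  obtain ⟨hn, hs1, hs2, he⟩ := hq
  have hlen : (arr.length : Int) = n + 1 := by omega
  have hps : (psum 0 arr).length = arr.length := psum_length 0 arr
  have hcl := clampIdx_in_range arr.length (q.1 - 1) (by omega) (by omega)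
  have hj1lt : PySem.List.clampIdx arr.length (q.1 - 1) < arr.length := by
    split_ifs at hcl <;> omega
  have e1 := pyAdd_norm arr (q.1 - 1) q.2.2 (by omega) (by omega)
  by_cases hc : q.2.1 < n
  · simp only [altStep, aStep, hc, if_true]
    have hset1 : sufAdd q.2.2 (PySem.List.clampIdx arr.length (q.1 - 1)) (psum 0 arr)
        = psum 0 (pyIAdd arr (q.1 - 1) q.2.2) := by
      rw [e1, psum_set q.2.2 arr 0 _ hj1lt]
    rw [slice_sufAdd, hps, hset1]
    have hlen1 : (pyIAdd arr (q.1 - 1) q.2.2).length = arr.length := length_pyIAdd arr _ _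
    have hps1 : (psum 0 (pyIAdd arr (q.1 - 1) q.2.2)).length
        = (pyIAdd arr (q.1 - 1) q.2.2).length := psum_length 0 _
    have hcl2 := clampIdx_in_range (pyIAdd arr (q.1 - 1) q.2.2).length q.2.1
      (by omega) (by omega)
    have hj2lt : PySem.List.clampIdx (pyIAdd arr (q.1 - 1) q.2.2).length q.2.1
        < (pyIAdd arr (q.1 - 1) q.2.2).length := by
      split_ifs at hcl2 <;> omega
    rw [slice_sufSub, hps1,
      pySub_norm (pyIAdd arr (q.1 - 1) q.2.2) q.2.1 q.2.2 (by omega) (by omega),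
      psum_set_sub q.2.2 _ 0 _ hj2lt]
  · simp only [altStep, aStep, hc, if_false]
    rw [slice_sufAdd, hps, ← psum_set q.2.2 arr 0 _ hj1lt, e1]

-- A's running-max loop over a list computes foldl max over its prefix sums
theorem fold_max_psum (l : List Int) (mv c : Int) :
    (l.foldl (fun p val => (max p.1 (p.2 + val), p.2 + val)) (mv, c)).1
      = (psum c l).foldl max mv := by
  induction l generalizing mv c with
  | nil => rfl
  | cons x xs ih => simp only [List.foldl, psum]; exact ih _ _

theorem psum_replicate_zero (k : Nat) : psum 0 (List.replicate k (0 : Int)) = List.replicate k 0 := by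
  induction k with
  | zero => rfl
  | succ k ih => simp [List.replicate, psum, ih]

theorem length_aStep (n : Int) (arr : List Int) (q : Int × Int × Int) :
    (aStep n arr q).length = arr.length := by
  unfold aStep
  split <;> simp [length_pyIAdd, length_pyISub]

theorem main_fold (n : Int) (qs : List (Int × Int × Int)) (arr : List Int)
    (hq : ∀ q ∈ qs, 0 ≤ n ∧ -(n + 1) ≤ q.1 - 1 ∧ q.1 - 1 < n + 1 ∧ (q.2.1 < n → -(n + 1) ≤ q.2.1))
    (hlen : arr.length = (n + 1).toNat) :
    qs.foldl (altStep n) (psum 0 arr) = psum 0 (qs.foldl (aStep n) arr) := by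
  induction qs generalizing arr with
  | nil => rfl
  | cons q qs ih =>
    simp only [List.foldl]
    rw [step_eq n arr q (hq q (by simp)) hlen]
    exact ih _ (fun q' hq' => hq q' (by simp [hq']))
      (by rw [length_aStep]; exact hlen)

theorem foldl_max_comm (t : List Int) (a b : Int) :
    max a (t.foldl max b) = t.foldl max (max a b) := by
  induction t generalizing b with
  | nil => rfl
  | cons y t ih => simp only [List.foldl]; rw [ih, max_assoc]

-- Python's max(0, max(l, default=0)) is the running-max loop from 0
theorem max_maxD_eq_foldl (l : List Int) :
    max 0 (PySem.List.maxD l (fun y => y) 0) = l.foldl max 0 := by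
  cases l with
  | nil => rfl
  | cons x t =>
    unfold PySem.List.maxD
    rw [PySem.List.max?_id_cons]
    simp only [Option.getD_some, List.foldl]
    rw [foldl_max_comm]

-- ===== VERDICT (by name: the statement is the Claim_ definition above) =====
theorem mix_the_array_spec : Claim_equal_mix_the_array := by
  intro n queries _ hpre
  unfold Spec_mix_the_array mix_the_array mix_the_array_alt
  simp only []
  rw [PySem.List.pyRepeat_singleton]
  rw [show queries.foldl (altStep n) (List.replicate (n+1).toNat (0:Int))
        = queries.foldl (altStep n) (psum 0 (List.replicate (n+1).toNat (0:Int))) by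
      rw [psum_replicate_zero]]
  rw [main_fold n queries _ hpre (by simp)]
  rw [max_maxD_eq_foldl]
  rw [fold_max_psum]
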